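-- pv_equiv track=rewrite | github.com/Ss0Mae/Baekjoon | 프로그래머스/1/468370. 중요한 단어를 스포 방지/중요한 단어를 스포 방지.py | solution
-- ===== SOURCE A (Python) =====
-- from collections import defaultdict
--
-- def solution(message, spoiler_ranges):
--     # 1) 단어 분해: word + [l,r]
--     words = []
--     spans = []  # (l,r)
--     n = len(message)
--
--     i = 0
--     while i < n:
--         j = i
--         while j < n and message[j] != ' ':
--             j += 1
--         words.append(message[i:j])
--         spans.append((i, j-1))
--         i = j + 1
--
--     W = len(words)
--     is_spoiler = [False] * W
--     last_touch = [-1] * W  # 이 단어와 겹치는 spoiler_range 중 가장 큰 인덱스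
--
--     # 2) 투 포인터로 word-span과 spoiler_range 겹침 처리 (둘 다 오름차순)
--     wi = 0
--     for si, (s, e) in enumerate(spoiler_ranges):
--         # 현재 스포 구간이 시작하기 전에 끝난 단어들 넘기기
--         while wi < W and spans[wi][1] < s:
--             wi += 1
--         k = wi
--         # 스포 구간과 겹치는 단어들 처리
--         while k < W and spans[k][0] <= e:
--             is_spoiler[k] = True
--             last_touch[k] = max(last_touch[k], si)
--             k += 1
--
--     # 3) 비스포 영역에 등장한 단어 집합
--     non_spoiler_seen = set()
--     for idx, w in enumerate(words):
--         if not is_spoiler[idx]: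
--             non_spoiler_seen.add(w)
--
--     # 4) 클릭 시점별로 공개되는 단어 모으기
--     reveal_buckets = defaultdict(list)  # click_idx -> [word_idx...]
--     for idx in range(W):
--         if is_spoiler[idx]:
--             reveal_buckets[last_touch[idx]].append(idx)
--
--     # 5) 클릭 순서대로 중요한 단어 카운트
--     revealed_spoiler_words = set()
--     ans = 0
--     for click_idx in range(len(spoiler_ranges)):
--         if click_idx not in reveal_buckets:
--             continue
--         for idx in reveal_buckets[click_idx]:  # idx 자체가 왼→오 순서
--             w = words[idx]
--             if w in non_spoiler_seen:
--                 continue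
--             if w in revealed_spoiler_words:
--                 continue
--             ans += 1
--             revealed_spoiler_words.add(w)
--
--     return ans
-- ===== SOURCE B (Python) =====
-- def solution(message, spoiler_ranges):
--     # words = the segments of message between single spaces; a terminal empty
--     # segment (empty message / trailing space) is not a word
--     words = message.split(' ')
--     if message == '' or message.endswith(' '):
--         words.pop()
--     # character span of each word: word t covers [starts[t], ends[t]]
--     starts, ends, pos = [], [], 0
--     for w in words:
--         starts.append(pos)
--         ends.append(pos + len(w) - 1)
--         pos += len(w) + 1
--     W = len(words)
--     spoiled = [False] * W
--     # amortized-linear painting: wi skips words ending before the range,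
--     # done remembers the paint frontier so no word is painted twice
--     wi = 0
--     done = 0
--     for s, e in spoiler_ranges:
--         while wi < W and ends[wi] < s:
--             wi += 1
--         k = wi if wi > done else done
--         while k < W and starts[k] <= e:
--             spoiled[k] = True
--             k += 1
--         if k > done:
--             done = k
--     # a spoiler word is important iff it never occurs outside spoiler areas
--     hidden, visible = set(), set()
--     for w, f in zip(words, spoiled):
--         (hidden if f else visible).add(w)
--     return len(hidden - visible)
-- ===== Notes on version B (the rewrite author's own statement) =====
-- stated objective: faster
-- what changed: B tokenizes with split(' ') instead of the hand-written index scan, paints each word at most once using a paint frontier ('done') instead of A's per-range re-scan of overlapping words, and drops A's last_touch/reveal-bucket/click-order simulation entirely, returning len(spoiler-words - visible-words), which equals A's click-ordered distinct count.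
import Mathlib
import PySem

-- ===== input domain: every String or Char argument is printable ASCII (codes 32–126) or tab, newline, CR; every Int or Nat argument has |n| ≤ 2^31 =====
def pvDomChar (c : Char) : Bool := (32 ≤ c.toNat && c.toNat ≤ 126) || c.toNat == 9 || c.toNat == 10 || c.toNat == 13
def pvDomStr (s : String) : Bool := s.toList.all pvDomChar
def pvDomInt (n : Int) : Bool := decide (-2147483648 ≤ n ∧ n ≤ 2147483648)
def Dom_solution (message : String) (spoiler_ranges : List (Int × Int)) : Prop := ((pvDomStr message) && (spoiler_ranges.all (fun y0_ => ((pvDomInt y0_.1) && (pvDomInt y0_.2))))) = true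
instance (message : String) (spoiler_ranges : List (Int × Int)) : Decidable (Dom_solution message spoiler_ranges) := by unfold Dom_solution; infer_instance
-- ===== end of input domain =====

-- B re-implements A faster and simpler: words come from split(' '), marking
-- paints each word at most once (paint frontier 'done') instead of A's
-- per-range re-scan, and A's last_touch/reveal-bucket/click-order simulation
-- is dropped: the answer equals len(spoiler-words - visible-words).

-- ===== PORT A =====
-- step 1: outer while over i with the inner scan-to-space loop; spans carry (i, j-1)
def tokA : List Char → Int → List (List Char × Int × Int)
  | [], _ => []
  | c :: cs, i =>
    (((c :: cs).takeWhile (fun ch => ch ≠ ' ')), i,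
        i + ((c :: cs).takeWhile (fun ch => ch ≠ ' ')).length - 1) ::
      tokA (((c :: cs).dropWhile (fun ch => ch ≠ ' ')).drop 1)
        (i + ((c :: cs).takeWhile (fun ch => ch ≠ ' ')).length + 1)
termination_by cs _ => cs.length
decreasing_by
  have h1 : ((c :: cs).dropWhile (fun ch => ch ≠ ' ')).length ≤ (c :: cs).length :=
    List.length_dropWhile_le _ _
  simp only [List.length_drop, List.length_cons] at *
  omega

-- while wi < W and spans[wi][1] < s: wi += 1
def advA (spans : List (Int × Int)) (s : Int) (wi : Nat) : Nat :=
  if h : wi < spans.length ∧ (spans.getD wi (0, 0)).2 < s then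
    advA spans s (wi + 1)
  else wi
termination_by spans.length - wi
decreasing_by omega

-- while k < W and spans[k][0] <= e: is_spoiler[k] = True; last_touch[k] = max(...); k += 1
def markA (spans : List (Int × Int)) (e : Int) (si : Int) (k : Nat)
    (spoil : List Bool) (touch : List Int) : List Bool × List Int :=
  if h : k < spans.length ∧ (spans.getD k (0, 0)).1 ≤ e then
    markA spans e si (k + 1) (spoil.set k true) (touch.set k (max (touch.getD k 0) si))
  else (spoil, touch)
termination_by spans.length - k
decreasing_by omega

-- step 2: body of `for si, (s, e) in enumerate(spoiler_ranges)`
def stepA (spans : List (Int × Int)) (st : Nat × List Bool × List Int)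
    (p : Int × (Int × Int)) : Nat × List Bool × List Int :=
  (advA spans p.2.1 st.1,
   markA spans p.2.2 p.1 (advA spans p.2.1 st.1) st.2.1 st.2.2)

-- step 3: set of words seen in non-spoiler areas
def nonSpA (ws : List (List Char)) (spoil : List Bool) : PySem.Set (List Char) :=
  (PySem.List.enumerate ws 0).foldl
    (fun acc q => if PySem.List.pyGetD spoil q.1 false then acc else PySem.Set.add acc q.2)
    PySem.Set.empty

-- step 4: reveal_buckets : click index -> word indices (defaultdict(list))
def bucketsA (spoil : List Bool) (touch : List Int) (W : Nat) : PySem.Dict Int (List Int) :=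
  (PySem.List.pyRange 0 (W : Int) 1).foldl
    (fun d idx =>
      if PySem.List.pyGetD spoil idx false then
        d.modify (PySem.List.pyGetD touch idx 0) [] (· ++ [idx])
      else d)
    PySem.Dict.empty

-- step 5: count important words in click order
def clicksA (ws : List (List Char)) (nonSp : PySem.Set (List Char))
    (buckets : PySem.Dict Int (List Int)) (n : Nat) : PySem.Set (List Char) × Int :=
  (PySem.List.pyRange 0 (n : Int) 1).foldl
    (fun st c =>
      if buckets.contains c then
        (buckets.getD c []).foldl
          (fun (st : PySem.Set (List Char) × Int) idx =>
            if PySem.Set.contains nonSp (PySem.List.pyGetD ws idx []) then st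
            else if PySem.Set.contains st.1 (PySem.List.pyGetD ws idx []) then st
            else (PySem.Set.add st.1 (PySem.List.pyGetD ws idx []), st.2 + 1))
          st
      else st)
    (PySem.Set.empty, 0)

def solution (message : String) (spoiler_ranges : List (Int × Int)) : Int :=
  let toks := tokA message.toList 0
  let words := toks.map (·.1)
  let spans := toks.map (·.2)
  let W := words.length
  let st := (PySem.List.enumerate spoiler_ranges 0).foldl (stepA spans)
    (0, List.replicate W false, List.replicate W (-1))
  (clicksA words (nonSpA words st.2.1) (bucketsA st.2.1 st.2.2 W) spoiler_ranges.length).2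

-- ===== PORT B =====
-- while wi < W and ends[wi] < s: wi += 1
def advB (W : Nat) (ends : List Int) (s : Int) (wi : Nat) : Nat :=
  if h : wi < W ∧ ends.getD wi 0 < s then advB W ends s (wi + 1) else wi
termination_by W - wi
decreasing_by omega

-- while k < W and starts[k] <= e: spoiled[k] = True; k += 1   (returns final k too)
def paintB (W : Nat) (starts : List Int) (e : Int) (k : Nat) (spoil : List Bool) :
    Nat × List Bool :=
  if h : k < W ∧ starts.getD k 0 ≤ e then paintB W starts e (k + 1) (spoil.set k true)
  else (k, spoil)
termination_by W - k
decreasing_by omega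

-- loop body over spoiler_ranges: advance wi, paint from the frontier, move the frontier
def stepB (W : Nat) (starts ends : List Int) (st : Nat × Nat × List Bool)
    (r : Int × Int) : Nat × Nat × List Bool :=
  let wi := advB W ends r.1 st.1
  let k0 := if st.2.1 < wi then wi else st.2.1
  let pr := paintB W starts r.2 k0 st.2.2
  (wi, if st.2.1 < pr.1 then pr.1 else st.2.1, pr.2)

def solution_alt (message : String) (spoiler_ranges : List (Int × Int)) : Int :=
  let words0 := PySem.Chars.splitOn message.toList [' ']
  let words := if message.toList = [] ∨ PySem.Chars.endswith message.toList [' '] then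
      words0.dropLast else words0
  let acc := words.foldl
    (fun (a : List Int × List Int × Int) w =>
      (a.1 ++ [a.2.2], a.2.1 ++ [a.2.2 + (w.length : Int) - 1], a.2.2 + (w.length : Int) + 1))
    ([], [], 0)
  let W := words.length
  let st := spoiler_ranges.foldl (stepB W acc.1 acc.2.1) (0, 0, List.replicate W false)
  let hv := (words.zip st.2.2).foldl
    (fun (hv : PySem.Set (List Char) × PySem.Set (List Char)) p =>
      if p.2 then (PySem.Set.add hv.1 p.1, hv.2) else (hv.1, PySem.Set.add hv.2 p.1))
    (PySem.Set.empty, PySem.Set.empty)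
  PySem.Set.len (PySem.Set.diff hv.1 hv.2)

-- ===== PRECONDITION & SPEC =====
def Spec_solution (message : String) (spoiler_ranges : List (Int × Int)) (out : Int) : Prop := out = solution_alt message spoiler_ranges
instance (message : String) (spoiler_ranges : List (Int × Int)) (out : Int) : Decidable (Spec_solution message spoiler_ranges out) := by unfold Spec_solution; infer_instance

-- ===== CLAIM (what is proved, stated in full; the proofs are below) =====
def Claim_equal_solution : Prop := ∀ (message : String) (spoiler_ranges : List (Int × Int)), Dom_solution message spoiler_ranges → Spec_solution message spoiler_ranges (solution message spoiler_ranges)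

-- ===== LEMMAS AND PROOFS =====

-- ---- tokenization: splitOn ' ' vs A's scanning loop ----

-- reference span builder: words with their character spans starting at position i
def gSpans : List (List Char) → Int → List (List Char × Int × Int)
  | [], _ => []
  | w :: ws, i => (w, i, i + w.length - 1) :: gSpans ws (i + w.length + 1)

theorem go_cons (fuel : Nat) (c : Char) (rest cur : List Char) (acc : List (List Char)) :
    PySem.Chars.splitOn.go [' '] (fuel+1) (c :: rest) cur acc =
      if (' ' == c) then
        PySem.Chars.splitOn.go [' '] fuel rest [] (cur.reverse :: acc)
      else PySem.Chars.splitOn.go [' '] fuel rest (c :: cur) acc := by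
  rw [PySem.Chars.splitOn.go]
  simp [List.isPrefixOf]

theorem go_nil (fuel : Nat) (cur : List Char) (acc : List (List Char)) :
    PySem.Chars.splitOn.go [' '] fuel [] cur acc = acc.reverse ++ [cur.reverse] := by
  cases fuel <;> rw [PySem.Chars.splitOn.go] <;> simp

theorem getD_set_bool (l : List Bool) (k j : Nat) (hk : k < l.length) :
    (l.set k true).getD j false = if j = k then true else l.getD j false := by
  by_cases h : j = k
  · subst h; simp [List.getD, List.getElem?_set_self, hk]
  · simp [List.getD, List.getElem?_set_ne (by omega : k ≠ j), h]

theorem getD_set_int (l : List Int) (k j : Nat) (v : Int) (hk : k < l.length) :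
    (l.set k v).getD j 0 = if j = k then v else l.getD j 0 := by
  by_cases h : j = k
  · subst h; simp [List.getD, List.getElem?_set_self, hk]
  · simp [List.getD, List.getElem?_set_ne (by omega : k ≠ j), h]

theorem go_fuel_irrel (l : List Char) : ∀ (fuel fuel' : Nat) (cur : List Char)
    (acc : List (List Char)), l.length < fuel → l.length < fuel' →
    PySem.Chars.splitOn.go [' '] fuel l cur acc = PySem.Chars.splitOn.go [' '] fuel' l cur acc := by
  induction l with
  | nil => intro fuel fuel' cur acc _ _; rw [go_nil, go_nil]
  | cons c rest ih =>
    intro fuel fuel' cur acc h1 h2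
    obtain ⟨f, rfl⟩ : ∃ f, fuel = f + 1 := ⟨fuel - 1, by simp at h1; omega⟩
    obtain ⟨f', rfl⟩ : ∃ f', fuel' = f' + 1 := ⟨fuel' - 1, by simp at h2; omega⟩
    simp only [List.length_cons] at h1 h2
    rw [go_cons, go_cons]
    by_cases hc : (' ' == c)
    · rw [if_pos hc, if_pos hc, ih f f' _ _ (by omega) (by omega)]
    · rw [if_neg hc, if_neg hc, ih f f' _ _ (by omega) (by omega)]

theorem go_spacefree (w : List Char) : ∀ (fuel : Nat) (cur : List Char)
    (acc : List (List Char)), (∀ c ∈ w, c ≠ ' ') → w.length < fuel →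
    PySem.Chars.splitOn.go [' '] fuel w cur acc = acc.reverse ++ [cur.reverse ++ w] := by
  induction w with
  | nil => intro fuel cur acc _ _; rw [go_nil]; simp
  | cons c rest ih =>
    intro fuel cur acc hw h1
    obtain ⟨f, rfl⟩ : ∃ f, fuel = f + 1 := ⟨fuel - 1, by simp at h1; omega⟩
    simp only [List.length_cons] at h1
    rw [go_cons, if_neg (by simp; exact fun h => (hw c (by simp) h.symm).elim)]
    rw [ih f (c :: cur) acc (fun x hx => hw x (by simp [hx])) (by omega)]
    simp

theorem go_emit (w : List Char) : ∀ (r : List Char) (fuel : Nat) (cur : List Char)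
    (acc : List (List Char)), (∀ c ∈ w, c ≠ ' ') → (w ++ ' ' :: r).length < fuel →
    PySem.Chars.splitOn.go [' '] fuel (w ++ ' ' :: r) cur acc =
      PySem.Chars.splitOn.go [' '] (r.length + 1) r [] ((cur.reverse ++ w) :: acc) := by
  induction w with
  | nil =>
    intro r fuel cur acc _ h1
    obtain ⟨f, rfl⟩ : ∃ f, fuel = f + 1 := ⟨fuel - 1, by simp at h1; omega⟩
    simp only [List.nil_append, List.length_cons] at h1 ⊢
    rw [go_cons, if_pos (by simp)]
    rw [go_fuel_irrel r f (r.length + 1) _ _ (by omega) (by omega)]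
    simp
  | cons c w' ih =>
    intro r fuel cur acc hw h1
    obtain ⟨f, rfl⟩ : ∃ f, fuel = f + 1 := ⟨fuel - 1, by simp at h1; omega⟩
    simp only [List.cons_append, List.length_cons] at h1 ⊢
    rw [go_cons, if_neg (by simp; exact fun h => (hw c (by simp) h.symm).elim)]
    rw [ih r f (c :: cur) acc (fun x hx => hw x (by simp [hx])) (by simp [List.length_append] at h1 ⊢; omega)]
    simp

theorem go_acc (l : List Char) : ∀ (fuel : Nat) (cur : List Char) (acc : List (List Char)),
    l.length < fuel →
    PySem.Chars.splitOn.go [' '] fuel l cur acc =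
      acc.reverse ++ PySem.Chars.splitOn.go [' '] (l.length + 1) l cur [] := by
  induction l with
  | nil => intro fuel cur acc _; rw [go_nil, go_nil]; simp
  | cons c rest ih =>
    intro fuel cur acc h1
    obtain ⟨f, rfl⟩ : ∃ f, fuel = f + 1 := ⟨fuel - 1, by simp at h1; omega⟩
    simp only [List.length_cons] at h1 ⊢
    rw [go_cons, go_cons]
    by_cases hc : (' ' == c)
    · rw [if_pos hc, if_pos hc]
      rw [ih f [] (cur.reverse :: acc) (by omega), ih (rest.length + 1) [] [cur.reverse] (by omega)]
      simp
    · rw [if_neg hc, if_neg hc]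
      rw [ih f (c :: cur) acc (by omega)]

theorem splitOn_spacefree (w : List Char) (h : ∀ c ∈ w, c ≠ ' ') :
    PySem.Chars.splitOn w [' '] = [w] := by
  unfold PySem.Chars.splitOn
  rw [go_spacefree w (w.length + 1) [] [] h (by omega)]
  simp

theorem splitOn_word_space (w r : List Char) (h : ∀ c ∈ w, c ≠ ' ') :
    PySem.Chars.splitOn (w ++ ' ' :: r) [' '] = w :: PySem.Chars.splitOn r [' '] := by
  unfold PySem.Chars.splitOn
  rw [go_emit w r _ [] [] h (by omega)]
  rw [go_acc r (r.length + 1) [] [([].reverse ++ w)] (by omega)]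
  simp

theorem tokA_eq_gSpans (cs : List Char) (i : Int) :
    tokA cs i = gSpans ((tokA cs i).map (·.1)) i := by
  fun_induction tokA cs i with
  | case1 => rfl
  | case2 c cs i ih =>
    simp only [List.map_cons, gSpans]
    exact congrArg₂ List.cons rfl ih

theorem splitOn_eq_tokA (cs : List Char) : ∀ (i : Int),
    PySem.Chars.splitOn cs [' '] =
      (tokA cs i).map (·.1) ++
        (if cs = [] ∨ cs.getLast? = some ' ' then [[]] else []) := by
  intro i
  fun_induction tokA cs i with
  | case1 i =>
    unfold PySem.Chars.splitOn
    rw [go_nil]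
    simp
  | case2 c cs i ih =>
    have hcat : (c :: cs).takeWhile (fun ch => ch ≠ ' ') ++
        (c :: cs).dropWhile (fun ch => ch ≠ ' ') = c :: cs :=
      List.takeWhile_append_dropWhile
    have hwsp : ∀ x ∈ (c :: cs).takeWhile (fun ch => ch ≠ ' '), x ≠ ' ' := by
      intro x hx
      have := List.mem_takeWhile_imp hx
      simpa using this
    cases hdc : (c :: cs).dropWhile (fun ch => ch ≠ ' ') with
    | nil =>
      have hcs : c :: cs = (c :: cs).takeWhile (fun ch => ch ≠ ' ') := by
        conv_lhs => rw [← hcat, hdc, List.append_nil]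
      have hne : ¬ (c :: cs = [] ∨ (c :: cs).getLast? = some ' ') := by
        rintro (h | h)
        · exact List.cons_ne_nil _ _ h
        · have hm := List.mem_of_getLast? h
          rw [hcs] at hm
          exact hwsp _ hm rfl
      rw [if_neg hne]
      conv_lhs => rw [hcs]
      rw [splitOn_spacefree _ hwsp]
      simp [tokA]
    | cons x r =>
      have hx : x = ' ' := by
        have h2 := List.head?_dropWhile_not (fun ch => decide (ch ≠ ' ')) (c :: cs)
        rw [hdc] at h2
        simpa using h2
      subst hx
      have hcs : c :: cs = (c :: cs).takeWhile (fun ch => ch ≠ ' ') ++ ' ' :: r := by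
        conv_lhs => rw [← hcat, hdc]
      rw [hdc] at ih
      simp only [List.drop_succ_cons, List.drop_zero] at ih
      have hcond : ((c :: cs) = [] ∨ (c :: cs).getLast? = some ' ') ↔
          (r = [] ∨ r.getLast? = some ' ') := by
        constructor
        · rintro (h | h)
          · exact absurd h (List.cons_ne_nil _ _)
          · rcases List.eq_nil_or_concat r with hr | ⟨r', a, rfl⟩
            · exact Or.inl hr
            · right
              simp only [List.concat_eq_append] at *
              rw [hcs, List.getLast?_append_of_ne_nil _ (List.cons_ne_nil _ _)] at h
              have : (' ' :: (r' ++ [a])).getLast? = some a := by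
                rw [show ' ' :: (r' ++ [a]) = (' ' :: r') ++ [a] by simp,
                  List.getLast?_concat]
              rw [this] at h
              rw [List.getLast?_concat]
              exact h
        · rintro (h | h)
          · subst h
            right
            rw [hcs, List.getLast?_append_of_ne_nil _ (List.cons_ne_nil _ _)]
            rfl
          · right
            rcases List.eq_nil_or_concat r with hr | ⟨r', a, rfl⟩
            · subst hr; simp at h
            · simp only [List.concat_eq_append] at *
              rw [List.getLast?_concat] at h
              rw [hcs, List.getLast?_append_of_ne_nil _ (List.cons_ne_nil _ _),
                show ' ' :: (r' ++ [a]) = (' ' :: r') ++ [a] by simp,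
                List.getLast?_concat]
              exact h
      conv_lhs => rw [hcs]
      rw [splitOn_word_space _ r hwsp, ih, if_congr hcond rfl rfl]
      simp

theorem endswith_iff_getLast (cs : List Char) :
    (PySem.Chars.endswith cs [' '] = true) ↔ cs.getLast? = some ' ' := by
  rw [PySem.Chars.endswith_iff]
  constructor
  · rintro ⟨l', rfl⟩
    exact List.getLast?_concat
  · intro h
    obtain ⟨l', rfl⟩ := List.getLast?_eq_some_iff.mp h
    exact ⟨l', rfl⟩

theorem wordsB_eq (cs : List Char) :
    (if cs = [] ∨ PySem.Chars.endswith cs [' '] then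
        (PySem.Chars.splitOn cs [' ']).dropLast else PySem.Chars.splitOn cs [' ']) =
      (tokA cs 0).map (·.1) := by
  by_cases hcond : cs = [] ∨ cs.getLast? = some ' '
  · have hc2 : cs = [] ∨ PySem.Chars.endswith cs [' '] = true :=
      hcond.imp id (fun h => (endswith_iff_getLast cs).mpr h)
    rw [if_pos hc2, splitOn_eq_tokA cs 0, if_pos hcond]
    exact List.dropLast_concat
  · have hc2 : ¬ (cs = [] ∨ PySem.Chars.endswith cs [' '] = true) := fun h =>
      hcond (h.imp id (fun h2 => (endswith_iff_getLast cs).mp h2))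
    rw [if_neg hc2, splitOn_eq_tokA cs 0, if_neg hcond, List.append_nil]

theorem spanfold (ws : List (List Char)) : ∀ (ss es : List Int) (i : Int),
    ws.foldl
      (fun (a : List Int × List Int × Int) w =>
        (a.1 ++ [a.2.2], a.2.1 ++ [a.2.2 + (w.length : Int) - 1], a.2.2 + (w.length : Int) + 1))
      (ss, es, i) =
      (ss ++ (gSpans ws i).map (·.2.1), es ++ (gSpans ws i).map (·.2.2),
        i + ((ws.map (fun w => (w.length : Int) + 1)).sum)) := by
  induction ws with
  | nil => intro ss es i; simp [gSpans]
  | cons w ws ih =>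
    intro ss es i
    simp only [List.foldl_cons, gSpans, List.map_cons, List.sum_cons]
    rw [ih]
    refine Prod.ext ?_ (Prod.ext ?_ ?_) <;> simp
    ring

theorem gSpans_mem (ws : List (List Char)) : ∀ (i : Int) (p : List Char × Int × Int),
    p ∈ gSpans ws i → i ≤ p.2.1 ∧ p.2.1 - 1 ≤ p.2.2 := by
  induction ws with
  | nil => intro i p hp; simp [gSpans] at hp
  | cons w ws ih =>
    intro i p hp
    simp only [gSpans, List.mem_cons] at hp
    rcases hp with h | h
    · subst h; constructor <;> simp <;> omega
    · have := ih (i + w.length + 1) p h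
      constructor
      · have : (0:Int) ≤ w.length := by positivity
        omega
      · exact this.2

theorem gSpans_pairwise (ws : List (List Char)) : ∀ (i : Int),
    (gSpans ws i).Pairwise (fun p q => p.2.1 ≤ q.2.1 ∧ p.2.2 ≤ q.2.2) := by
  induction ws with
  | nil => intro i; simp [gSpans]
  | cons w ws ih =>
    intro i
    simp only [gSpans]
    refine List.Pairwise.cons ?_ (ih _)
    intro q hq
    have h := gSpans_mem ws (i + w.length + 1) q hq
    have hw : (0:Int) ≤ w.length := by positivity
    constructor <;> simp <;> omega

theorem spans_mono_starts (spans : List (Int × Int))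
    (hp : spans.Pairwise (fun p q => p.1 ≤ q.1 ∧ p.2 ≤ q.2)) :
    ∀ a b : Nat, a ≤ b → b < spans.length →
      (spans.getD a (0, 0)).1 ≤ (spans.getD b (0, 0)).1 := by
  intro a b hab hb
  rcases eq_or_lt_of_le hab with h | h
  · subst h; exact le_refl _
  · have := (List.pairwise_iff_getElem.mp hp) a b (by omega) hb h
    simp [List.getD, List.getElem?_eq_getElem, (by omega : a < spans.length), hb]
    exact this.1

theorem advA_ge (spans : List (Int × Int)) (s : Int) (wi : Nat) :
    wi ≤ advA spans s wi := by
  unfold advA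
  split
  · exact le_trans (by omega) (advA_ge spans s (wi+1))
  · exact le_refl wi
termination_by spans.length - wi
decreasing_by
  rename_i h; omega

theorem adv_eq (spans : List (Int × Int)) (s : Int) (wi : Nat) :
    advA spans s wi = advB spans.length (spans.map (·.2)) s wi := by
  unfold advA advB
  have hg : wi < spans.length → (spans.map (·.2)).getD wi 0 = (spans.getD wi (0,0)).2 := by
    intro h
    simp [List.getD, List.getElem?_map, List.getElem?_eq_getElem h]
  by_cases h : wi < spans.length ∧ (spans.getD wi (0, 0)).2 < s
  · rw [dif_pos h, dif_pos (by rw [hg h.1]; exact h)]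
    exact adv_eq spans s (wi+1)
  · rw [dif_neg h, dif_neg ?_]
    intro h2
    exact h ⟨h2.1, by rw [← hg h2.1]; exact h2.2⟩
termination_by spans.length - wi
decreasing_by omega

theorem markA_fst_length (spans : List (Int × Int)) (e si : Int) : ∀ (k : Nat)
    (spoil : List Bool) (touch : List Int),
    (markA spans e si k spoil touch).1.length = spoil.length := by
  intro k spoil touch
  unfold markA
  split
  · rw [markA_fst_length spans e si (k+1)]; simp
  · rfl
termination_by k => spans.length - k
decreasing_by omega

theorem markA_snd_length (spans : List (Int × Int)) (e si : Int) : ∀ (k : Nat)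
    (spoil : List Bool) (touch : List Int),
    (markA spans e si k spoil touch).2.length = touch.length := by
  intro k spoil touch
  unfold markA
  split
  · rw [markA_snd_length spans e si (k+1)]; simp
  · rfl
termination_by k => spans.length - k
decreasing_by omega

theorem markA_fst_getD (spans : List (Int × Int)) (e si : Int)
    (hm : ∀ a b : Nat, a ≤ b → b < spans.length →
      (spans.getD a (0, 0)).1 ≤ (spans.getD b (0, 0)).1) :
    ∀ (k : Nat) (spoil : List Bool) (touch : List Int), spoil.length = spans.length →
    ∀ j : Nat, (markA spans e si k spoil touch).1.getD j false =
      (spoil.getD j false ||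
        decide (k ≤ j ∧ j < spans.length ∧ (spans.getD j (0, 0)).1 ≤ e)) := by
  intro k spoil touch hlen j
  unfold markA
  split
  · rename_i h
    rw [markA_fst_getD spans e si hm (k+1) _ _ (by simp [hlen]) j]
    rw [getD_set_bool spoil k j (by omega)]
    by_cases hj : j = k
    · subst hj
      rw [if_pos rfl, Bool.true_or,
        decide_eq_true (show j ≤ j ∧ j < spans.length ∧ (spans.getD j (0,0)).1 ≤ e from
          ⟨le_refl j, h.1, h.2⟩), Bool.or_true]
    · rw [if_neg hj]
      congr 1
      exact decide_eq_decide.mpr (by constructor <;> rintro ⟨h1, h2⟩ <;> exact ⟨by omega, h2⟩)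
  · rename_i h
    have hnot : ¬ (k ≤ j ∧ j < spans.length ∧ (spans.getD j (0, 0)).1 ≤ e) := by
      rintro ⟨h1, h2, h3⟩
      exact h ⟨by omega, le_trans (hm k j h1 h2) h3⟩
    rw [decide_eq_false hnot, Bool.or_false]
termination_by k => spans.length - k
decreasing_by omega

theorem markA_snd_getD (spans : List (Int × Int)) (e si : Int)
    (hm : ∀ a b : Nat, a ≤ b → b < spans.length →
      (spans.getD a (0, 0)).1 ≤ (spans.getD b (0, 0)).1) :
    ∀ (k : Nat) (spoil : List Bool) (touch : List Int), touch.length = spans.length →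
    ∀ j : Nat, (markA spans e si k spoil touch).2.getD j 0 =
      if k ≤ j ∧ j < spans.length ∧ (spans.getD j (0, 0)).1 ≤ e then
        max (touch.getD j 0) si else touch.getD j 0 := by
  intro k spoil touch hlen j
  unfold markA
  split
  · rename_i h
    rw [markA_snd_getD spans e si hm (k+1) _ _ (by simp [hlen]) j]
    rw [getD_set_int touch k j _ (by omega)]
    by_cases hj : j = k
    · subst hj
      rw [if_neg (by rintro ⟨h1, _⟩; omega), if_pos rfl,
        if_pos (show j ≤ j ∧ j < spans.length ∧ (spans.getD j (0,0)).1 ≤ e from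
          ⟨le_refl j, h.1, h.2⟩)]
    · rw [if_neg hj]
      have hiff : (k + 1 ≤ j ∧ j < spans.length ∧ (spans.getD j (0,0)).1 ≤ e) ↔
          (k ≤ j ∧ j < spans.length ∧ (spans.getD j (0,0)).1 ≤ e) := by
        constructor <;> rintro ⟨h1, h2⟩ <;> exact ⟨by omega, h2⟩
      rw [if_congr hiff rfl rfl]
  · rename_i h
    have hnot : ¬ (k ≤ j ∧ j < spans.length ∧ (spans.getD j (0, 0)).1 ≤ e) := by
      rintro ⟨h1, h2, h3⟩
      exact h ⟨by omega, le_trans (hm k j h1 h2) h3⟩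
    rw [if_neg hnot]
termination_by k => spans.length - k
decreasing_by omega

theorem paintB_snd_length (W : Nat) (starts : List Int) (e : Int) : ∀ (k : Nat)
    (spoil : List Bool), (paintB W starts e k spoil).2.length = spoil.length := by
  intro k spoil
  unfold paintB
  split
  · rw [paintB_snd_length W starts e (k+1)]; simp
  · rfl
termination_by k => W - k
decreasing_by omega

theorem paintB_snd_getD (W : Nat) (starts : List Int) (e : Int)
    (hm : ∀ a b : Nat, a ≤ b → b < W → starts.getD a 0 ≤ starts.getD b 0) :
    ∀ (k : Nat) (spoil : List Bool), spoil.length = W →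
    ∀ j : Nat, (paintB W starts e k spoil).2.getD j false =
      (spoil.getD j false || decide (k ≤ j ∧ j < W ∧ starts.getD j 0 ≤ e)) := by
  intro k spoil hlen j
  unfold paintB
  split
  · rename_i h
    rw [paintB_snd_getD W starts e hm (k+1) _ (by simp [hlen]) j]
    rw [getD_set_bool spoil k j (by omega)]
    by_cases hj : j = k
    · subst hj
      rw [if_pos rfl, Bool.true_or,
        decide_eq_true (show j ≤ j ∧ j < W ∧ starts.getD j 0 ≤ e from ⟨le_refl j, h.1, h.2⟩),
        Bool.or_true]
    · rw [if_neg hj]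
      congr 1
      exact decide_eq_decide.mpr (by constructor <;> rintro ⟨h1, h2⟩ <;> exact ⟨by omega, h2⟩)
  · rename_i h
    have hnot : ¬ (k ≤ j ∧ j < W ∧ starts.getD j 0 ≤ e) := by
      rintro ⟨h1, h2, h3⟩
      exact h ⟨by omega, le_trans (hm k j h1 h2) h3⟩
    rw [decide_eq_false hnot, Bool.or_false]
termination_by k => W - k
decreasing_by omega

theorem paintB_k_ge (W : Nat) (starts : List Int) (e : Int) : ∀ (k : Nat)
    (spoil : List Bool), k ≤ (paintB W starts e k spoil).1 := by
  intro k spoil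
  unfold paintB
  split
  · exact le_trans (by omega) (paintB_k_ge W starts e (k+1) _)
  · exact le_refl k
termination_by k => W - k
decreasing_by omega

theorem paintB_k_range (W : Nat) (starts : List Int) (e : Int) : ∀ (k : Nat)
    (spoil : List Bool) (j : Nat), k ≤ j → j < (paintB W starts e k spoil).1 →
    j < W ∧ starts.getD j 0 ≤ e := by
  intro k spoil j hkj hj
  unfold paintB at hj
  split at hj
  · rename_i h
    by_cases hje : j = k
    · subst hje; exact ⟨h.1, h.2⟩
    · exact paintB_k_range W starts e (k+1) _ j (by omega) hj
  · omega
termination_by k _ j => W - k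
decreasing_by omega

theorem ext_getD_bool (l₁ l₂ : List Bool) (hl : l₁.length = l₂.length)
    (h : ∀ j, l₁.getD j false = l₂.getD j false) : l₁ = l₂ := by
  apply List.ext_getElem hl
  intro j h1 h2
  have := h j
  simpa [List.getD, List.getElem?_eq_getElem, h1, h2] using this

theorem fold_marking_eq (spans : List (Int × Int)) (W : Nat) (hW : W = spans.length)
    (hmS : ∀ a b : Nat, a ≤ b → b < spans.length →
      (spans.getD a (0, 0)).1 ≤ (spans.getD b (0, 0)).1) :
    ∀ (rs : List (Int × Int)) (t : Int) (wi done : Nat) (spoil : List Bool)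
      (touch : List Int), spoil.length = W → touch.length = W → 0 ≤ t →
      (∀ j, wi ≤ j → j < done → spoil.getD j false = true) →
      (∀ j, j < W → touch.getD j 0 < t) →
      (∀ j, j < W → spoil.getD j false = true → 0 ≤ touch.getD j 0) →
      ((PySem.List.enumerate rs t).foldl (stepA spans) (wi, spoil, touch)).2.1 =
          (rs.foldl (stepB W (spans.map (·.1)) (spans.map (·.2))) (wi, done, spoil)).2.2 ∧
        ((PySem.List.enumerate rs t).foldl (stepA spans) (wi, spoil, touch)).2.1.length = W ∧
        ((PySem.List.enumerate rs t).foldl (stepA spans) (wi, spoil, touch)).2.2.length = W ∧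
        (∀ j, j < W →
          ((PySem.List.enumerate rs t).foldl (stepA spans) (wi, spoil, touch)).2.2.getD j 0 <
            t + rs.length) ∧
        (∀ j, j < W →
          ((PySem.List.enumerate rs t).foldl (stepA spans) (wi, spoil, touch)).2.1.getD j false = true →
          0 ≤ ((PySem.List.enumerate rs t).foldl (stepA spans) (wi, spoil, touch)).2.2.getD j 0) := by
  subst hW
  have hstart : ∀ a : Nat, a < spans.length →
      (spans.map (·.1)).getD a 0 = (spans.getD a (0, 0)).1 := by
    intro a ha
    simp [List.getD, List.getElem?_map, List.getElem?_eq_getElem ha]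
  have hmS' : ∀ a b : Nat, a ≤ b → b < spans.length →
      (spans.map (·.1)).getD a 0 ≤ (spans.map (·.1)).getD b 0 := by
    intro a b hab hb
    rw [hstart a (by omega), hstart b hb]
    exact hmS a b hab hb
  intro rs
  induction rs with
  | nil =>
    intro t wi done spoil touch h1 h2 ht0 hI ht hs
    refine ⟨rfl, h1, h2, ?_, hs⟩
    intro j hj
    have := ht j hj
    simp only [show PySem.List.enumerate ([] : List (Int × Int)) t = [] from rfl,
      List.foldl_nil, List.length_nil]
    omega
  | cons r rs ih =>
    intro t wi done spoil touch h1 h2 ht0 hI ht hs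
    have henum : PySem.List.enumerate (r :: rs) t = (t, r) :: PySem.List.enumerate rs (t + 1) := by
      simp [PySem.List.enumerate]
    rw [henum]
    simp only [List.foldl_cons]
    -- the two step results
    have hwige : wi ≤ advA spans r.1 wi := advA_ge spans r.1 wi
    have hadv : advB spans.length (spans.map (·.2)) r.1 wi = advA spans r.1 wi :=
      (adv_eq spans r.1 wi).symm
    simp only [stepA, stepB, hadv]
    set wi' := advA spans r.1 wi with hwi'
    set k0 := if done < wi' then wi' else done with hk0
    set pr := paintB spans.length (spans.map (·.1)) r.2 k0 spoil with hpr
    set done' := if done < pr.1 then pr.1 else done with hdone'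
    set mk := markA spans r.2 t wi' spoil touch with hmk
    have hwik0 : wi' ≤ k0 := by rw [hk0]; split <;> omega
    have hlen1 : mk.1.length = spoil.length := markA_fst_length spans r.2 t wi' spoil touch
    have hlen2 : mk.2.length = touch.length := markA_snd_length spans r.2 t wi' spoil touch
    have hfst := markA_fst_getD spans r.2 t hmS wi' spoil touch h1
    have hsnd := markA_snd_getD spans r.2 t hmS wi' spoil touch h2
    have hpsnd := paintB_snd_getD spans.length (spans.map (·.1)) r.2 hmS' k0 spoil h1
    -- the two new spoiler arrays agree
    have hEq : mk.1 = pr.2 := by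
      apply ext_getD_bool
      · rw [hlen1, hpr, paintB_snd_length]
      · intro j
        rw [hfst j, hpsnd j]
        cases hsp : spoil.getD j false with
        | true => rfl
        | false =>
          simp only [Bool.false_or]
          by_cases hP : wi' ≤ j ∧ j < spans.length ∧ (spans.getD j (0, 0)).1 ≤ r.2
          · rw [decide_eq_true hP]
            by_cases hk : k0 ≤ j
            · rw [decide_eq_true ⟨hk, hP.2.1, by rw [hstart j hP.2.1]; exact hP.2.2⟩]
            · exfalso
              have hjd : j < done := by rw [hk0] at hk; split at hk <;> omega
              have := hI j (by omega) hjd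
              rw [this] at hsp
              exact Bool.noConfusion hsp
          · rw [decide_eq_false hP, decide_eq_false ?_]
            rintro ⟨hk, hjl, hst⟩
            exact hP ⟨by omega, hjl, by rw [← hstart j hjl]; exact hst⟩
    rw [← hEq]
    -- apply the induction hypothesis at the new state
    have hnew := ih (t + 1) wi' done' mk.1 mk.2
      (by rw [hlen1, h1]) (by rw [hlen2, h2]) (by omega)
      (by
        intro j hj1 hj2
        rw [hfst j]
        by_cases hjd : j < done
        · rw [hI j (by omega) hjd, Bool.true_or]
        · have hjp : j < pr.1 := by
            rw [hdone'] at hj2; split at hj2 <;> omega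
          have hk0j : k0 ≤ j := by rw [hk0]; split <;> omega
          have hrange := paintB_k_range spans.length (spans.map (·.1)) r.2 k0 spoil j hk0j hjp
          rw [decide_eq_true ⟨hj1, hrange.1, by rw [← hstart j hrange.1]; exact hrange.2⟩,
            Bool.or_true])
      (by
        intro j hj
        rw [hsnd j]
        have := ht j hj
        split <;> omega)
      (by
        intro j hj hsp
        rw [hsnd j]
        rw [hfst j] at hsp
        split
        · rename_i hc
          have := ht j hj
          omega
        · rename_i hc
          rcases Bool.or_eq_true_iff.mp hsp with h | h
          · exact hs j hj h
          · exact absurd (of_decide_eq_true h) hc)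
    refine ⟨hnew.1, hnew.2.1, hnew.2.2.1, ?_, hnew.2.2.2.2⟩
    intro j hj
    have := hnew.2.2.2.1 j hj
    simp only [List.length_cons]
    rw [show (wi', mk.1, mk.2) = (wi', mk) from rfl] at this
    push_cast at this ⊢
    omega

-- ---- counting: A's click-ordered distinct count = |hidden \ visible| ----

-- generic: membership of a conditional add-loop
theorem mem_foldl_add_if {β : Type} (l : List β) (p : β → Bool) (f : β → List Char) :
    ∀ (s : PySem.Set (List Char)) (w : List Char),
    (w ∈ l.foldl (fun acc b => if p b then acc else PySem.Set.add acc (f b)) s) ↔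
      w ∈ s ∨ ∃ b ∈ l, p b = false ∧ w = f b := by
  induction l with
  | nil => intro s w; simp
  | cons b l ih =>
    intro s w
    simp only [List.foldl_cons]
    cases hb : p b with
    | true =>
      rw [if_pos rfl, ih]
      constructor
      · rintro (h | h)
        · exact Or.inl h
        · exact Or.inr (by obtain ⟨b', hb', h⟩ := h; exact ⟨b', by simp [hb'], h⟩)
      · rintro (h | ⟨b', hb', hpb', hw⟩)
        · exact Or.inl h
        · rcases List.mem_cons.mp hb' with rfl | hb''
          · rw [hb] at hpb'; exact absurd hpb' (by simp)
          · exact Or.inr ⟨b', hb'', hpb', hw⟩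
    | false =>
      rw [if_neg (by simp), ih]
      constructor
      · rintro (h | h)
        · rcases PySem.Set.mem_add s (f b) w |>.mp h with h | h
          · exact Or.inl h
          · exact Or.inr ⟨b, by simp, hb, h⟩
        · exact Or.inr (by obtain ⟨b', hb', h⟩ := h; exact ⟨b', by simp [hb'], h⟩)
      · rintro (h | ⟨b', hb', hpb', hw⟩)
        · exact Or.inl ((PySem.Set.mem_add s (f b) w).mpr (Or.inl h))
        · rcases List.mem_cons.mp hb' with rfl | hb''
          · exact Or.inl ((PySem.Set.mem_add s (f b') w).mpr (Or.inr hw))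
          · exact Or.inr ⟨b', hb'', hpb', hw⟩

-- the hidden/visible pair loop is two set-updates
theorem hv_fold (l : List (List Char × Bool)) : ∀ (h v : PySem.Set (List Char)),
    l.foldl
      (fun (hv : PySem.Set (List Char) × PySem.Set (List Char)) p =>
        if p.2 then (PySem.Set.add hv.1 p.1, hv.2) else (hv.1, PySem.Set.add hv.2 p.1))
      (h, v) =
    (PySem.Set.update h ((l.filter (·.2)).map (·.1)),
     PySem.Set.update v ((l.filter (fun p => !p.2)).map (·.1))) := by
  induction l with
  | nil => intro h v; simp [PySem.Set.update_nil]
  | cons p l ih =>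
    intro h v
    cases hp : p.2 with
    | true =>
      rw [List.foldl_cons, if_pos hp, ih]
      rw [List.filter_cons, List.filter_cons]
      simp [hp, PySem.Set.update_cons]
    | false =>
      rw [List.foldl_cons, if_neg (by rw [hp]; exact Bool.false_ne_true), ih]
      rw [List.filter_cons, List.filter_cons]
      simp [hp, PySem.Set.update_cons]

-- buckets lookup: indices grouped by their last_touch value, in index order
theorem buckets_getD (spoil : List Bool) (touch : List Int) (W : Nat) (c : Int) :
    (bucketsA spoil touch W).getD c [] =
      ((PySem.List.pyRange 0 (W : Int) 1).filter
        (fun idx => PySem.List.pyGetD spoil idx false)).filter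
        (fun idx => PySem.List.pyGetD touch idx 0 == c) := by
  unfold bucketsA
  simp only [PySem.List.foldl_if_eq_foldl_filter]
  rw [show (((PySem.List.pyRange 0 (W : Int) 1).filter
      (fun idx => PySem.List.pyGetD spoil idx false)).foldl
      (fun d idx => d.modify (PySem.List.pyGetD touch idx 0) [] (· ++ [idx]))
      PySem.Dict.empty) =
    ((((PySem.List.pyRange 0 (W : Int) 1).filter
      (fun idx => PySem.List.pyGetD spoil idx false)).map
        (fun idx => (PySem.List.pyGetD touch idx 0, idx))).foldl
      (fun d p => d.modify p.1 [] (· ++ [p.2])) PySem.Dict.empty) from by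
    rw [List.foldl_map]]
  rw [PySem.Dict.getD_foldl_modify_append]
  simp [List.filter_map, Function.comp_def, List.map_map]

-- the click loop is a fold over the concatenated buckets
theorem clicksA_eq_foldV (ws : List (List Char)) (nonSp : PySem.Set (List Char))
    (buckets : PySem.Dict Int (List Int)) (n : Nat) :
    clicksA ws nonSp buckets n =
      ((PySem.List.pyRange 0 (n : Int) 1).flatMap (fun c => buckets.getD c [])).foldl
        (fun (st : PySem.Set (List Char) × Int) idx =>
          if PySem.Set.contains nonSp (PySem.List.pyGetD ws idx []) then st
          else if PySem.Set.contains st.1 (PySem.List.pyGetD ws idx []) then st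
          else (PySem.Set.add st.1 (PySem.List.pyGetD ws idx []), st.2 + 1))
        (PySem.Set.empty, 0) := by
  unfold clicksA
  rw [List.foldl_flatMap]
  apply PySem.List.foldl_congr_mem
  intro st c _
  by_cases hc : buckets.contains c
  · rw [if_pos hc]
  · rw [if_neg hc,
      PySem.Dict.getD_of_not_contains buckets [] (by simpa using hc)]
    rfl

-- the dedup-count loop: resulting set is an update, count is its growth
theorem fold5_char (ws : List (List Char)) (nonSp : PySem.Set (List Char))
    (V : List Int) : ∀ (s : PySem.Set (List Char)) (a : Int), s.Nodup →
    (V.foldl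
        (fun (st : PySem.Set (List Char) × Int) idx =>
          if PySem.Set.contains nonSp (PySem.List.pyGetD ws idx []) then st
          else if PySem.Set.contains st.1 (PySem.List.pyGetD ws idx []) then st
          else (PySem.Set.add st.1 (PySem.List.pyGetD ws idx []), st.2 + 1))
        (s, a)) =
      (PySem.Set.update s ((V.map (fun idx => PySem.List.pyGetD ws idx [])).filter
          (fun w => !PySem.Set.contains nonSp w)),
        a + (((PySem.Set.update s ((V.map (fun idx => PySem.List.pyGetD ws idx [])).filter
          (fun w => !PySem.Set.contains nonSp w))).length : Int) - (s.length : Int))) := by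
  induction V with
  | nil =>
    intro s a _
    simp [PySem.Set.update_nil]
  | cons idx V ih =>
    intro s a hnd
    rw [List.foldl_cons, List.map_cons]
    by_cases h1 : PySem.Set.contains nonSp (PySem.List.pyGetD ws idx []) = true
    · rw [if_pos h1, ih s a hnd, List.filter_cons_of_neg (by rw [h1]; decide)]
    · have h1' : PySem.Set.contains nonSp (PySem.List.pyGetD ws idx []) = false := by
        simpa using h1
      rw [if_neg h1]
      by_cases h2 : PySem.Set.contains s (PySem.List.pyGetD ws idx []) = true
      · rw [if_pos h2, ih s a hnd, List.filter_cons_of_pos (by rw [h1']; decide),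
          PySem.Set.update_cons, PySem.Set.add_of_mem (PySem.Set.contains_iff s _ |>.mp h2)]
      · have hnmem : PySem.List.pyGetD ws idx [] ∉ s := fun hm =>
          h2 (PySem.Set.contains_iff s _ |>.mpr hm)
        rw [if_neg h2, ih (PySem.Set.add s (PySem.List.pyGetD ws idx [])) (a + 1)
            (PySem.Set.nodup_add s _ hnd),
          List.filter_cons_of_pos (by rw [h1']; decide),
          PySem.Set.update_cons, PySem.Set.add_of_not_mem hnmem]
        refine Prod.ext rfl ?_
        show a + 1 + _ = a + _
        simp only [List.length_append, List.length_cons, List.length_nil]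
        push_cast
        omega

theorem flatMap_congr_mem {α β : Type} (l : List α) (f g : α → List β)
    (h : ∀ c ∈ l, f c = g c) : l.flatMap f = l.flatMap g := by
  induction l with
  | nil => rfl
  | cons c l ih =>
    simp only [List.flatMap_cons]
    rw [h c (by simp), ih (fun c' hc' => h c' (by simp [hc']))]

theorem flatMap_filter_perm (C : List Int) : ∀ (L : List Int) (key : Int → Int),
    C.Nodup → (∀ x ∈ L, key x ∈ C) →
    (C.flatMap (fun c => L.filter (fun x => key x == c))).Perm L := by
  induction C with
  | nil =>
    intro L key _ hL
    cases L with
    | nil => simp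
    | cons x t => exact absurd (hL x (by simp)) (by simp)
  | cons c C' ih =>
    intro L key hC hL
    have hc : c ∉ C' := (List.nodup_cons.mp hC).1
    simp only [List.flatMap_cons]
    have hshift : C'.flatMap (fun c' => L.filter (fun x => key x == c')) =
        C'.flatMap (fun c' => (L.filter (fun x => !(key x == c))).filter
          (fun x => key x == c')) := by
      apply flatMap_congr_mem
      intro c' hc'
      rw [List.filter_filter]
      apply List.filter_congr
      intro x _
      cases hk : (key x == c') with
      | true =>
        have : ¬ (key x == c) = true := by
          intro hkc
          exact hc (by rw [← show key x = c' from by simpa using hk,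
            show key x = c from by simpa using hkc] at hc'; exact hc')
        simp [hk, this]
      | false => simp [hk]
    rw [hshift]
    refine List.Perm.trans (List.Perm.append_left _ (ih _ key (List.nodup_cons.mp hC).2 ?_))
      (List.filter_append_perm _ L)
    intro x hx
    have hxm := List.mem_filter.mp hx
    rcases List.mem_cons.mp (hL x hxm.1) with h | h
    · exact absurd (h : key x = c) (by simpa using hxm.2)
    · exact h

theorem mem_zipf (ws : List (List Char)) (spoil : List Bool) (hlen : spoil.length = ws.length)
    (q : Bool → Bool) (w : List Char) :
    w ∈ ((ws.zip spoil).filter (fun p => q p.2)).map (·.1) ↔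
      ∃ j, ∃ (hj : j < ws.length), q (spoil.getD j false) = true ∧ ws[j] = w := by
  rw [List.mem_map]
  constructor
  · rintro ⟨p, hp, hw⟩
    obtain ⟨hpz, hq⟩ := List.mem_filter.mp hp
    obtain ⟨j, hj, hpj⟩ := List.mem_iff_getElem.mp hpz
    have hjw : j < ws.length := by
      have := hj; simp [List.length_zip, hlen] at this; omega
    refine ⟨j, hjw, ?_, ?_⟩
    · rw [List.getD_eq_getElem spoil false (by omega)]
      rw [← hpj] at hq
      simpa [List.getElem_zip] using hq
    · rw [← hw, ← hpj]
      simp [List.getElem_zip]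
  · rintro ⟨j, hj, hq, hw⟩
    refine ⟨(ws[j], spoil[j]), ?_, hw⟩
    refine List.mem_filter.mpr ⟨?_, ?_⟩
    · exact List.mem_iff_getElem.mpr ⟨j, by simp [List.length_zip, hlen]; omega,
        by simp [List.getElem_zip]⟩
    · rw [List.getD_eq_getElem spoil false (by omega : j < spoil.length)] at hq
      simpa using hq

theorem mem_SI_map (ws : List (List Char)) (spoil : List Bool)
    (hlen : spoil.length = ws.length) (w : List Char) :
    w ∈ (((PySem.List.pyRange 0 (ws.length : Int) 1).filter
        (fun idx => PySem.List.pyGetD spoil idx false)).map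
        (fun idx => PySem.List.pyGetD ws idx [])) ↔
      ∃ j, ∃ (hj : j < ws.length), spoil.getD j false = true ∧ ws[j] = w := by
  rw [List.mem_map]
  constructor
  · rintro ⟨idx, hidx, hw⟩
    obtain ⟨hrange, hsp⟩ := List.mem_filter.mp hidx
    obtain ⟨h0, hW⟩ := PySem.List.mem_pyRange_one.mp hrange
    have hj : idx.toNat < ws.length := by omega
    refine ⟨idx.toNat, hj, ?_, ?_⟩
    · rw [PySem.List.pyGetD_of_nonneg spoil false h0] at hsp
      exact hsp
    · rw [PySem.List.pyGetD_of_nonneg ws [] h0] at hw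
      rw [← hw, List.getD_eq_getElem ws [] hj]
  · rintro ⟨j, hj, hsp, hw⟩
    refine ⟨(j : Int), List.mem_filter.mpr ⟨PySem.List.mem_pyRange_one.mpr
      ⟨by positivity, by exact_mod_cast hj⟩, ?_⟩, ?_⟩
    · rw [PySem.List.pyGetD_natCast]
      exact hsp
    · rw [PySem.List.pyGetD_natCast]
      rw [List.getD_eq_getElem ws [] hj]
      exact hw

theorem mem_nonSpA (ws : List (List Char)) (spoil : List Bool) (w : List Char) :
    w ∈ nonSpA ws spoil ↔
      ∃ j, ∃ (hj : j < ws.length), spoil.getD j false = false ∧ ws[j] = w := by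
  unfold nonSpA
  rw [mem_foldl_add_if]
  constructor
  · rintro (h | ⟨q, hq, hpq, hw⟩)
    · exact absurd h (by simp [PySem.Set.empty])
    · obtain ⟨k, hk, rfl⟩ := (PySem.List.mem_enumerate_iff ws 0 q).mp hq
      refine ⟨k, hk, ?_, ?_⟩
      · simpa using hpq
      · exact hw.symm
  · rintro ⟨j, hj, hsp, hw⟩
    right
    refine ⟨(0 + (j : Int), ws[j]), (PySem.List.mem_enumerate_iff ws 0 _).mpr ⟨j, hj, rfl⟩,
      ?_, hw.symm⟩
    simpa using hsp

theorem count_eq (ws : List (List Char)) (spoil : List Bool) (touch : List Int)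
    (n : Nat) (hlen : spoil.length = ws.length)
    (hb : ∀ j, j < ws.length → spoil.getD j false = true →
      0 ≤ touch.getD j 0 ∧ touch.getD j 0 < (n : Int)) :
    (clicksA ws (nonSpA ws spoil) (bucketsA spoil touch ws.length) n).2 =
      PySem.Set.len (PySem.Set.diff
        ((ws.zip spoil).foldl
          (fun (hv : PySem.Set (List Char) × PySem.Set (List Char)) p =>
            if p.2 then (PySem.Set.add hv.1 p.1, hv.2) else (hv.1, PySem.Set.add hv.2 p.1))
          (PySem.Set.empty, PySem.Set.empty)).1
        ((ws.zip spoil).foldl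
          (fun (hv : PySem.Set (List Char) × PySem.Set (List Char)) p =>
            if p.2 then (PySem.Set.add hv.1 p.1, hv.2) else (hv.1, PySem.Set.add hv.2 p.1))
          (PySem.Set.empty, PySem.Set.empty)).2) := by
  -- A side: reduce to |ofList LA|
  rw [clicksA_eq_foldV,
    flatMap_congr_mem _ _ _ (fun c _ => buckets_getD spoil touch ws.length c),
    fold5_char ws (nonSpA ws spoil) _ PySem.Set.empty 0 List.nodup_nil]
  -- B side: reduce to |ofList HL \ ofList VL|
  rw [hv_fold]
  -- name the pieces
  set SI := (PySem.List.pyRange 0 (ws.length : Int) 1).filter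
    (fun idx => PySem.List.pyGetD spoil idx false) with hSI
  set V := (PySem.List.pyRange 0 (n : Int) 1).flatMap
    (fun c => SI.filter (fun idx => PySem.List.pyGetD touch idx 0 == c)) with hV
  set HL := ((ws.zip spoil).filter (·.2)).map (·.1) with hHL
  set VL := ((ws.zip spoil).filter (fun p => !p.2)).map (·.1) with hVL
  set wAt := fun idx => PySem.List.pyGetD ws idx [] with hwAt
  set pA := fun w => !PySem.Set.contains (nonSpA ws spoil) w with hpA
  have hemp : (PySem.Set.empty : PySem.Set (List Char)) = [] := rfl
  simp only [hemp, PySem.Set.update_nil_left]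
  -- the permutation V ~ SI
  have hperm : V.Perm SI := by
    rw [hV]
    apply flatMap_filter_perm _ _ (fun idx => PySem.List.pyGetD touch idx 0)
      (PySem.List.nodup_pyRange_one 0 (n : Int))
    intro x hx
    obtain ⟨hxr, hxs⟩ := List.mem_filter.mp hx
    obtain ⟨h0, hW⟩ := PySem.List.mem_pyRange_one.mp hxr
    have hx' : x.toNat < ws.length := by omega
    have hsp : spoil.getD x.toNat false = true := by
      rwa [PySem.List.pyGetD_of_nonneg spoil false h0] at hxs
    have := hb x.toNat hx' hsp
    rw [PySem.List.pyGetD_of_nonneg touch 0 h0]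
    exact PySem.List.mem_pyRange_one.mpr ⟨this.1, this.2⟩
  -- both sides are cards of the same finset
  show (0 : Int) + (((PySem.Set.ofList ((V.map wAt).filter pA)).length : Int) - ([] : List (List Char)).length) =
    PySem.Set.len (PySem.Set.diff (PySem.Set.ofList HL) (PySem.Set.ofList VL))
  rw [show PySem.Set.len (PySem.Set.diff (PySem.Set.ofList HL) (PySem.Set.ofList VL)) =
      (((PySem.Set.ofList HL).filter (fun w => !PySem.Set.contains (PySem.Set.ofList VL) w)).length : Int)
    from rfl]
  simp only [List.length_nil, Nat.cast_zero, sub_zero, zero_add]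
  congr 1
  -- Nat-level counting via toFinset cards
  have hofA : (PySem.Set.ofList ((V.map wAt).filter pA)).length =
      ((V.map wAt).filter pA).toFinset.card := by
    rw [← List.toFinset_card_of_nodup (PySem.Set.nodup_ofList _)]
    congr 1
    apply Finset.ext
    intro w
    simp [List.mem_toFinset, PySem.Set.mem_ofList]
  have hofB : ((PySem.Set.ofList HL).filter (fun w => !PySem.Set.contains (PySem.Set.ofList VL) w)).length =
      (HL.filter (fun w => !PySem.Set.contains (PySem.Set.ofList VL) w)).toFinset.card := by
    rw [← List.toFinset_card_of_nodup ((PySem.Set.nodup_ofList _).filter _)]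
    congr 1
    apply Finset.ext
    intro w
    simp only [List.mem_toFinset, List.mem_filter, PySem.Set.mem_ofList]
  rw [hofA, hofB]
  congr 1
  -- finset equality
  apply Finset.ext
  intro w
  simp only [List.mem_toFinset, List.mem_filter]
  have hVmap : w ∈ V.map wAt ↔
      ∃ j, ∃ (hj : j < ws.length), spoil.getD j false = true ∧ ws[j] = w := by
    rw [List.Perm.mem_iff (hperm.map wAt)]
    exact mem_SI_map ws spoil hlen w
  have hHLmem : w ∈ HL ↔
      ∃ j, ∃ (hj : j < ws.length), spoil.getD j false = true ∧ ws[j] = w :=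
    mem_zipf ws spoil hlen (fun b => b) w
  have hVLmem : w ∈ VL ↔
      ∃ j, ∃ (hj : j < ws.length), (!spoil.getD j false) = true ∧ ws[j] = w :=
    mem_zipf ws spoil hlen (fun b => !b) w
  have hnon : (∃ j, ∃ (hj : j < ws.length), spoil.getD j false = false ∧ ws[j] = w) ↔
      w ∈ nonSpA ws spoil := (mem_nonSpA ws spoil w).symm
  constructor
  · rintro ⟨hmem, hp⟩
    refine ⟨hHLmem.mpr (hVmap.mp hmem), ?_⟩
    have hnm : w ∉ nonSpA ws spoil := by
      intro hm
      have hp' : (!PySem.Set.contains (nonSpA ws spoil) w) = true := hp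
      rw [(PySem.Set.contains_iff _ w).mpr hm] at hp'
      exact Bool.noConfusion hp'
    cases hX : PySem.Set.contains (PySem.Set.ofList VL) w with
    | false => rfl
    | true =>
      exfalso
      obtain ⟨j, hj, hq, hw⟩ := hVLmem.mp
        ((PySem.Set.mem_ofList VL w).mp ((PySem.Set.contains_iff _ w).mp hX))
      exact hnm (hnon.mp ⟨j, hj, by simpa using hq, hw⟩)
  · rintro ⟨hmem, hp⟩
    refine ⟨hVmap.mpr (hHLmem.mp hmem), ?_⟩
    show (!PySem.Set.contains (nonSpA ws spoil) w) = true
    cases hX : PySem.Set.contains (nonSpA ws spoil) w with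
    | false => rfl
    | true =>
      exfalso
      obtain ⟨j, hj, hq, hw⟩ := hnon.mpr ((PySem.Set.contains_iff _ w).mp hX)
      have hvl : w ∈ VL := hVLmem.mpr ⟨j, hj, by simpa using hq, hw⟩
      have hp' : (!PySem.Set.contains (PySem.Set.ofList VL) w) = true := hp
      rw [(PySem.Set.contains_iff _ w).mpr ((PySem.Set.mem_ofList VL w).mpr hvl)] at hp'
      exact Bool.noConfusion hp'

theorem main_eq (message : String) (spoiler_ranges : List (Int × Int)) :
    solution message spoiler_ranges = solution_alt message spoiler_ranges := by
  simp only [solution, solution_alt]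
  rw [wordsB_eq message.toList]
  rw [spanfold ((tokA message.toList 0).map (·.1)) [] [] 0]
  have hg : gSpans ((tokA message.toList 0).map (·.1)) 0 = tokA message.toList 0 :=
    (tokA_eq_gSpans message.toList 0).symm
  have hstarts : (gSpans ((tokA message.toList 0).map (·.1)) 0).map (·.2.1) =
      ((tokA message.toList 0).map (·.2)).map (·.1) := by
    rw [hg]
    simp [List.map_map, Function.comp_def]
  have hends : (gSpans ((tokA message.toList 0).map (·.1)) 0).map (·.2.2) =
      ((tokA message.toList 0).map (·.2)).map (·.2) := by
    rw [hg]
    simp [List.map_map, Function.comp_def]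
  rw [hstarts, hends]
  dsimp only [List.nil_append]
  set words := (tokA message.toList 0).map (·.1) with hwords
  set spans := (tokA message.toList 0).map (·.2) with hspans
  have hWlen : words.length = spans.length := by
    rw [hwords, hspans, List.length_map, List.length_map]
  have hpair : spans.Pairwise (fun p q => p.1 ≤ q.1 ∧ p.2 ≤ q.2) := by
    rw [hspans, ← hg]
    exact List.Pairwise.map _ (fun a b hab => hab) (gSpans_pairwise words 0)
  have hmono := spans_mono_starts spans hpair
  have hfold := fold_marking_eq spans words.length hWlen hmono spoiler_ranges 0 0 0
    (List.replicate words.length false) (List.replicate words.length (-1))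
    (List.length_replicate) (List.length_replicate) (le_refl 0)
    (by intro j _ hj; omega)
    (by
      intro j hj
      have : (List.replicate words.length (-1 : Int)).getD j 0 = -1 := by
        simp [List.getD, List.getElem?_replicate, hj]
      rw [this]
      omega)
    (by
      intro j hj hsp
      have : (List.replicate words.length false).getD j false = false := by
        simp only [List.getD, List.getElem?_replicate]
        split <;> rfl
      rw [this] at hsp
      exact Bool.noConfusion hsp)
  rw [← hfold.1]
  exact count_eq words _ _ spoiler_ranges.length hfold.2.1
    (by
      intro j hj hsp
      refine ⟨hfold.2.2.2.2 j hj hsp, ?_⟩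
      have := hfold.2.2.2.1 j hj
      omega)

-- ===== VERDICT (by name: the statement is the Claim_ definition above) =====
theorem solution_spec : Claim_equal_solution := by
  intro message spoiler_ranges _
  unfold Spec_solution
  exact main_eq message spoiler_ranges
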